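-- pv_equiv track=rewrite | github.com/brianpabent/open-enzyme | experiments/comp-016-t-abcg2-suppression-evidence-mining/analyze.py | classify_tissue
-- ===== SOURCE A (Python) =====
-- def classify_tissue(s):
--     measured = s.get("tissue_measured", [])
--     if isinstance(measured, str):
--         measured = [measured]
--     measured = [m.lower() for m in measured]
--     if any("intestine" in m or "ileum" in m or "jejunum" in m or "duodenum" in m or "caco" in m for m in measured):
--         if any("kidney" in m or "renal" in m for m in measured):
--             return "BOTH_INTESTINE_AND_KIDNEY"
--         return "INTESTINE"
--     if any("kidney" in m or "renal" in m for m in measured):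
--         return "KIDNEY_ONLY"
--     if any("liver" in m or "hepatic" in m for m in measured):
--         return "LIVER_ONLY"
--     if any("serum" in m or "urinary" in m or "fecal" in m for m in measured):
--         return "ENDPOINT_ONLY"
--     if any("lncap" in m or "cancer" in m for m in measured):
--         return "CANCER_LINE"
--     return "OTHER_OR_REVIEW"
-- ===== SOURCE B (Python) =====
-- KEYWORDS = [
--     ("intestine", ["intestine", "ileum", "jejunum", "duodenum", "caco"]),
--     ("kidney", ["kidney", "renal"]),
--     ("liver", ["liver", "hepatic"]),
--     ("endpoint", ["serum", "urinary", "fecal"]),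
--     ("cancer", ["lncap", "cancer"]),
-- ]
--
--
-- def classify_tissue(s):
--     measured = s.get("tissue_measured", [])
--     if isinstance(measured, str):
--         measured = [measured]
--     present = set()
--     for m in measured:
--         ml = m.lower()
--         for label, kws in KEYWORDS:
--             if any(k in ml for k in kws):
--                 present.add(label)
--     if "intestine" in present:
--         return "BOTH_INTESTINE_AND_KIDNEY" if "kidney" in present else "INTESTINE"
--     if "kidney" in present:
--         return "KIDNEY_ONLY"
--     if "liver" in present:
--         return "LIVER_ONLY"
--     if "endpoint" in present:
--         return "ENDPOINT_ONLY"
--     if "cancer" in present: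
--         return "CANCER_LINE"
--     return "OTHER_OR_REVIEW"
-- ===== Notes on version B (the rewrite author's own statement) =====
-- stated objective: alternative
-- what changed: A re-scans the measured list with up to six separate any(...) passes; B makes one pass over the list collecting matching category tags into a set against a keyword table, then decides by set membership in the same priority order.
import Mathlib
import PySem

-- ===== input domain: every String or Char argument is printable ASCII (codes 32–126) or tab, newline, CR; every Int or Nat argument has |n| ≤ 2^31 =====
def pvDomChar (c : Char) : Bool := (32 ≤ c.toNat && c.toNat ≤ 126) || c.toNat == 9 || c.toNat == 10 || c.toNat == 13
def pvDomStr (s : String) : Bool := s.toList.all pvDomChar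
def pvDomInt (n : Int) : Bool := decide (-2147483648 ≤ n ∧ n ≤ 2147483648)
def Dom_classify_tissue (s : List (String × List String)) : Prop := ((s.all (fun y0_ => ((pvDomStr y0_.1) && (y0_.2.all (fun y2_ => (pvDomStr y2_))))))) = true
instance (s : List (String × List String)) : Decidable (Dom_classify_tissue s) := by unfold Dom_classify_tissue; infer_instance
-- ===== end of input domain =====

-- B replaces A's repeated any(...) scans of the measured list by one pass that collects
-- matching category tags into a set against a keyword table, then branches on set
-- membership in the same priority order (objective: alternative; same cost).
-- (The Python `isinstance(measured, str)` coercion in both programs is unreachable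
-- under the List String value type and is not ported.)

-- ===== PORT A =====
def classify_tissue (s : List (String × List String)) : String :=
  let measured := (PySem.Dict.mk s).getD "tissue_measured" []
  let measured := measured.map (fun m => PySem.Str.lower m)
  if measured.any (fun m => PySem.Str.isIn "intestine" m || PySem.Str.isIn "ileum" m ||
      PySem.Str.isIn "jejunum" m || PySem.Str.isIn "duodenum" m || PySem.Str.isIn "caco" m) then
    if measured.any (fun m => PySem.Str.isIn "kidney" m || PySem.Str.isIn "renal" m) then
      "BOTH_INTESTINE_AND_KIDNEY"
    else "INTESTINE"
  else if measured.any (fun m => PySem.Str.isIn "kidney" m || PySem.Str.isIn "renal" m) then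
    "KIDNEY_ONLY"
  else if measured.any (fun m => PySem.Str.isIn "liver" m || PySem.Str.isIn "hepatic" m) then
    "LIVER_ONLY"
  else if measured.any (fun m => PySem.Str.isIn "serum" m || PySem.Str.isIn "urinary" m ||
      PySem.Str.isIn "fecal" m) then
    "ENDPOINT_ONLY"
  else if measured.any (fun m => PySem.Str.isIn "lncap" m || PySem.Str.isIn "cancer" m) then
    "CANCER_LINE"
  else "OTHER_OR_REVIEW"

-- ===== PORT B =====
def tissueKeywords : List (String × List String) :=
  [("intestine", ["intestine", "ileum", "jejunum", "duodenum", "caco"]),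
   ("kidney", ["kidney", "renal"]),
   ("liver", ["liver", "hepatic"]),
   ("endpoint", ["serum", "urinary", "fecal"]),
   ("cancer", ["lncap", "cancer"])]

def classify_tissue_alt (s : List (String × List String)) : String :=
  let measured := (PySem.Dict.mk s).getD "tissue_measured" []
  let present : PySem.Set String :=
    measured.foldl (fun acc m =>
      let ml := PySem.Str.lower m
      tissueKeywords.foldl (fun a p =>
        if p.2.any (fun k => PySem.Str.isIn k ml) then PySem.Set.add a p.1 else a) acc)
      PySem.Set.empty
  if present.contains "intestine" then
    if present.contains "kidney" then "BOTH_INTESTINE_AND_KIDNEY" else "INTESTINE"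
  else if present.contains "kidney" then "KIDNEY_ONLY"
  else if present.contains "liver" then "LIVER_ONLY"
  else if present.contains "endpoint" then "ENDPOINT_ONLY"
  else if present.contains "cancer" then "CANCER_LINE"
  else "OTHER_OR_REVIEW"

-- ===== PRECONDITION & SPEC =====
def Spec_classify_tissue (s : List (String × List String)) (out : String) : Prop := out = classify_tissue_alt s
instance (s : List (String × List String)) (out : String) : Decidable (Spec_classify_tissue s out) := by unfold Spec_classify_tissue; infer_instance

-- ===== CLAIM (what is proved, stated in full; the proofs are below) =====
def Claim_equal_classify_tissue : Prop := ∀ (s : List (String × List String)), Dom_classify_tissue s → Spec_classify_tissue s (classify_tissue s)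

-- ===== LEMMAS AND PROOFS =====

-- membership in the inner (keyword-table) fold of B
theorem inner_contains (kws : List (String × List String)) (ml : String)
    (acc : PySem.Set String) (l : String) :
    (kws.foldl (fun a p =>
        if p.2.any (fun k => PySem.Str.isIn k ml) then PySem.Set.add a p.1 else a) acc).contains l
      = (acc.contains l ||
         kws.any (fun p => p.1 == l && p.2.any (fun k => PySem.Str.isIn k ml))) := by
  induction kws generalizing acc with
  | nil => simp
  | cons p rest ih =>
    simp only [List.foldl_cons, List.any_cons]
    by_cases h : (p.2.any fun k => PySem.Str.isIn k ml) = true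
    · rw [if_pos h, ih, h]
      by_cases he : p.1 = l
      · subst he
        simp [PySem.Set.mem_add]
      · have hb : (p.1 == l) = false := by simp [he]
        simp [hb, PySem.Set.mem_add, Ne.symm he]
    · have h' : (p.2.any fun k => PySem.Str.isIn k ml) = false := by
        simpa using h
      rw [if_neg h, ih, h']
      simp

-- membership in B's whole one-pass fold
theorem present_contains (ms : List String) (acc : PySem.Set String) (l : String) :
    (ms.foldl (fun acc m =>
        let ml := PySem.Str.lower m
        tissueKeywords.foldl (fun a p =>
          if p.2.any (fun k => PySem.Str.isIn k ml) then PySem.Set.add a p.1 else a) acc) acc).contains l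
      = (acc.contains l ||
         ms.any (fun m => tissueKeywords.any
            (fun p => p.1 == l && p.2.any (fun k => PySem.Str.isIn k (PySem.Str.lower m))))) := by
  induction ms generalizing acc with
  | nil => simp
  | cons m rest ih =>
    simp only [List.foldl_cons, List.any_cons, ih, inner_contains, Bool.or_assoc]

-- evaluation of the keyword table at each of the five concrete labels
theorem table_intestine (ml : String) :
    (tissueKeywords.any fun p => p.1 == "intestine" && p.2.any fun k => PySem.Str.isIn k ml)
      = (PySem.Str.isIn "intestine" ml || PySem.Str.isIn "ileum" ml || PySem.Str.isIn "jejunum" ml ||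
         PySem.Str.isIn "duodenum" ml || PySem.Str.isIn "caco" ml) := by
  simp [tissueKeywords, Bool.or_assoc]

theorem table_kidney (ml : String) :
    (tissueKeywords.any fun p => p.1 == "kidney" && p.2.any fun k => PySem.Str.isIn k ml)
      = (PySem.Str.isIn "kidney" ml || PySem.Str.isIn "renal" ml) := by
  simp [tissueKeywords]

theorem table_liver (ml : String) :
    (tissueKeywords.any fun p => p.1 == "liver" && p.2.any fun k => PySem.Str.isIn k ml)
      = (PySem.Str.isIn "liver" ml || PySem.Str.isIn "hepatic" ml) := by
  simp [tissueKeywords]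

theorem table_endpoint (ml : String) :
    (tissueKeywords.any fun p => p.1 == "endpoint" && p.2.any fun k => PySem.Str.isIn k ml)
      = (PySem.Str.isIn "serum" ml || PySem.Str.isIn "urinary" ml || PySem.Str.isIn "fecal" ml) := by
  simp [tissueKeywords, Bool.or_assoc]

theorem table_cancer (ml : String) :
    (tissueKeywords.any fun p => p.1 == "cancer" && p.2.any fun k => PySem.Str.isIn k ml)
      = (PySem.Str.isIn "lncap" ml || PySem.Str.isIn "cancer" ml) := by
  simp [tissueKeywords]

-- ===== VERDICT (by name: the statement is the Claim_ definition above) =====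
theorem classify_tissue_spec : Claim_equal_classify_tissue := by
  intro s _
  unfold Spec_classify_tissue classify_tissue classify_tissue_alt
  simp only [present_contains, table_intestine, table_kidney, table_liver, table_endpoint,
    table_cancer, List.any_map, Function.comp_def, Bool.or_assoc]
  simp [PySem.Set.empty, PySem.Set.contains]
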